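-- pv_equiv track=rewrite | github.com/Craybloge/Campus-Academy | Programme Python/Main.py | addingStar
-- ===== SOURCE A (Python) =====
-- def addingStar(drawing,maxWidth):
--     spaces = maxWidth-6
--     starSpaces = 4
--     for line in range(7):
--         drawing.append([])
--         [drawing[line].append(" ") for rows in range(spaces)]
--         if line < 2:
--             [drawing[line].append(" ") for rows in range(4-starSpaces)]
--             drawing[line].append("*")
--             for rows in range(2):
--                 [drawing[line].append(" ") for rows in range(starSpaces)]
--                 drawing[line].append("*")
--             [drawing[line].append(" ") for rows in range(4-starSpaces)]
--             starSpaces -= 2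
--         if line == 3:
--             for rows in range(11):
--                 drawing[line].append("*") if rows%2 == 0 else drawing[line].append(" ")
--         if line == 4 or line == 2:
--             [drawing[line].append(" ") for rows in range(5)]
--             drawing[line].append("*")
--             [drawing[line].append(" ") for rows in range(5)]
--         if line == 5:
--             [drawing[line].append(" ") for rows in range(2)]
--             drawing[line].append("*")
--             [drawing[line].append(" ") for rows in range(2)]
--             drawing[line].append("|")
--             [drawing[line].append(" ") for rows in range(2)]
--             drawing[line].append("*")
--             [drawing[line].append(" ") for rows in range(2)]
--         if line == 6:
--             drawing[line].append("*")
--             [drawing[line].append(" ") for rows in range(4)]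
--             drawing[line].append("|")
--             [drawing[line].append(" ") for rows in range(4)]
--             drawing[line].append("*")
--         for rows in range(spaces):
--             drawing[line].append(" ")
--     return drawing
-- ===== SOURCE B (Python) =====
-- STAR_LINES = [
--     "*    *    *",
--     "  *  *  *  ",
--     "     *     ",
--     "* * * * * *",
--     "     *     ",
--     "  *  |  *  ",
--     "*    |    *",
-- ]
--
-- def addingStar(drawing, maxWidth):
--     pad = [" "] * (maxWidth - 6)
--     for i, s in enumerate(STAR_LINES):
--         drawing.append([])
--         drawing[i].extend(pad + list(s) + pad)
--     return drawing
-- ===== Notes on version B (the rewrite author's own statement) =====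
-- stated objective: simpler
-- what changed: B replaces A's branchy counter-driven per-line construction (six if-branches and a mutating starSpaces counter) with a fixed table of the 7 center strings and one uniform pad+chars+pad pass per line.
import Mathlib
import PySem

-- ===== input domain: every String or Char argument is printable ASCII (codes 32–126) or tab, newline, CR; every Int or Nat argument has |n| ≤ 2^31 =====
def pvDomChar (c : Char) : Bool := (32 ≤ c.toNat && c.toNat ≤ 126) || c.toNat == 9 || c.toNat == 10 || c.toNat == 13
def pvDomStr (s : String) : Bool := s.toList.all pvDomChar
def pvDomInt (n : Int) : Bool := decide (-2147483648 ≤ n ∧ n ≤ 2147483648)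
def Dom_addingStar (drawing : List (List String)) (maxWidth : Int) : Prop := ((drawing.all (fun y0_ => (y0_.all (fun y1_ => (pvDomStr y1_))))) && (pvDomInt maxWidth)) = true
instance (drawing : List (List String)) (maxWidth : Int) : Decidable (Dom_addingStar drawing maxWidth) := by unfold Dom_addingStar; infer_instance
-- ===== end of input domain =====

-- B replaces A's branchy counter-driven construction with a fixed table of the 7 center
-- strings and one uniform pad+chars+pad pass per line (objective: simpler).
-- NOTE: both Pythons mutate `drawing` in place identically (append 7 rows, extend rows
-- 0..6); the equivalence proved here is about the returned value.

-- ===== PORT A =====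
-- The loop body of A, lifted to a helper. In-place mutation of drawing[line] is modeled
-- with List.modify: each Python block of appends to drawing[line] becomes one modify of
-- row `line` performing those appends in statement order. Each `range(n)` comprehension
-- appending n spaces becomes `List.replicate n " "` (empty for negative n, exactly like
-- Python's empty range).
def addingStarStep (spaces : Int) (st : List (List String) × Int) (line : Nat) : List (List String) × Int :=
  let dr := st.1 ++ [[]]                    -- drawing.append([])
  let ss := st.2                            -- starSpaces
  let dr := dr.modify line (fun row => row ++ List.replicate spaces.toNat " ")
  let (dr, ss) :=
    if line < 2 then
      (dr.modify line (fun row =>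
        let row := row ++ List.replicate (4 - ss).toNat " "
        let row := row ++ ["*"]
        let row := (List.range 2).foldl
          (fun r _ => r ++ List.replicate ss.toNat " " ++ ["*"]) row
        row ++ List.replicate (4 - ss).toNat " "), ss - 2)
    else (dr, ss)
  let dr :=
    if line == 3 then
      dr.modify line (fun row =>
        (List.range 11).foldl
          (fun r rows => if rows % 2 == 0 then r ++ ["*"] else r ++ [" "]) row)
    else dr
  let dr :=
    if line == 4 || line == 2 then
      dr.modify line (fun row => row ++ List.replicate 5 " " ++ ["*"] ++ List.replicate 5 " ")
    else dr
  let dr :=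
    if line == 5 then
      dr.modify line (fun row =>
        row ++ List.replicate 2 " " ++ ["*"] ++ List.replicate 2 " " ++ ["|"]
            ++ List.replicate 2 " " ++ ["*"] ++ List.replicate 2 " ")
    else dr
  let dr :=
    if line == 6 then
      dr.modify line (fun row =>
        row ++ ["*"] ++ List.replicate 4 " " ++ ["|"] ++ List.replicate 4 " " ++ ["*"])
    else dr
  let dr := dr.modify line (fun row => row ++ List.replicate spaces.toNat " ")
  (dr, ss)

def addingStar (drawing : List (List String)) (maxWidth : Int) : List (List String) :=
  ((List.range 7).foldl (addingStarStep (maxWidth - 6)) (drawing, 4)).1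

-- ===== PORT B =====
def starLines : List String :=
  ["*    *    *", "  *  *  *  ", "     *     ", "* * * * * *",
   "     *     ", "  *  |  *  ", "*    |    *"]

-- one uniform pass per line: append a fresh row, extend row i with pad + chars + pad
def addingStarAltStep (pad : List String) (dr : List (List String)) (p : String × Nat) : List (List String) :=
  (dr ++ [[]]).modify p.2
    (fun row => row ++ (pad ++ (p.1.toList.map (fun c => String.ofList [c]) ++ pad)))

def addingStar_alt (drawing : List (List String)) (maxWidth : Int) : List (List String) :=
  starLines.zipIdx.foldl (addingStarAltStep (List.replicate (maxWidth - 6).toNat " ")) drawing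

-- ===== PRECONDITION & SPEC =====
def Spec_addingStar (drawing : List (List String)) (maxWidth : Int) (out : List (List String)) : Prop := out = addingStar_alt drawing maxWidth
instance (drawing : List (List String)) (maxWidth : Int) (out : List (List String)) : Decidable (Spec_addingStar drawing maxWidth out) := by unfold Spec_addingStar; infer_instance

-- ===== CLAIM (what is proved, stated in full; the proofs are below) =====
def Claim_equal_addingStar : Prop := ∀ (drawing : List (List String)) (maxWidth : Int), Dom_addingStar drawing maxWidth → Spec_addingStar drawing maxWidth (addingStar drawing maxWidth)

-- ===== LEMMAS AND PROOFS =====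
theorem modify_modify_same {α : Type} (l : List α) (i : Nat) (f g : α → α) :
    (l.modify i f).modify i g = l.modify i (fun x => g (f x)) := by
  induction l generalizing i with
  | nil => cases i <;> rfl
  | cons a t ih =>
    cases i with
    | zero => rfl
    | succ j =>
      show a :: ((t.modify j f).modify j g) = a :: (t.modify j (fun x => g (f x)))
      exact congrArg _ (ih j)

-- A's step at each concrete line equals B's uniform step with that line's center string.
theorem stepA0 (s : Int) (dr : List (List String)) :
    addingStarStep s (dr, 4) 0 =
      (addingStarAltStep (List.replicate s.toNat " ") dr ("*    *    *", 0), 2) := by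
  norm_num [addingStarStep, addingStarAltStep, modify_modify_same, List.append_assoc,
    List.range_succ, show Int.toNat 4 = 4 from rfl, show Int.toNat 2 = 2 from rfl,
    List.replicate_succ, List.replicate_zero,
    show "*    *    *".toList.map (fun c => String.ofList [c]) =
      ["*", " ", " ", " ", " ", "*", " ", " ", " ", " ", "*"] from by decide]

theorem stepA1 (s : Int) (dr : List (List String)) :
    addingStarStep s (dr, 2) 1 =
      (addingStarAltStep (List.replicate s.toNat " ") dr ("  *  *  *  ", 1), 0) := by
  norm_num [addingStarStep, addingStarAltStep, modify_modify_same, List.append_assoc,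
    List.range_succ, show Int.toNat 2 = 2 from rfl,
    List.replicate_succ, List.replicate_zero,
    show "  *  *  *  ".toList.map (fun c => String.ofList [c]) =
      [" ", " ", "*", " ", " ", "*", " ", " ", "*", " ", " "] from by decide]

theorem stepA2 (s : Int) (dr : List (List String)) :
    addingStarStep s (dr, 0) 2 =
      (addingStarAltStep (List.replicate s.toNat " ") dr ("     *     ", 2), 0) := by
  norm_num [addingStarStep, addingStarAltStep, modify_modify_same, List.append_assoc,
    List.replicate_succ, List.replicate_zero,
    show "     *     ".toList.map (fun c => String.ofList [c]) =
      [" ", " ", " ", " ", " ", "*", " ", " ", " ", " ", " "] from by decide]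

theorem stepA3 (s : Int) (dr : List (List String)) :
    addingStarStep s (dr, 0) 3 =
      (addingStarAltStep (List.replicate s.toNat " ") dr ("* * * * * *", 3), 0) := by
  norm_num [addingStarStep, addingStarAltStep, modify_modify_same, List.append_assoc,
    List.range_succ, List.replicate_succ, List.replicate_zero,
    show "* * * * * *".toList.map (fun c => String.ofList [c]) =
      ["*", " ", "*", " ", "*", " ", "*", " ", "*", " ", "*"] from by decide]

theorem stepA4 (s : Int) (dr : List (List String)) :
    addingStarStep s (dr, 0) 4 =
      (addingStarAltStep (List.replicate s.toNat " ") dr ("     *     ", 4), 0) := by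
  norm_num [addingStarStep, addingStarAltStep, modify_modify_same, List.append_assoc,
    List.replicate_succ, List.replicate_zero,
    show "     *     ".toList.map (fun c => String.ofList [c]) =
      [" ", " ", " ", " ", " ", "*", " ", " ", " ", " ", " "] from by decide]

theorem stepA5 (s : Int) (dr : List (List String)) :
    addingStarStep s (dr, 0) 5 =
      (addingStarAltStep (List.replicate s.toNat " ") dr ("  *  |  *  ", 5), 0) := by
  norm_num [addingStarStep, addingStarAltStep, modify_modify_same, List.append_assoc,
    List.replicate_succ, List.replicate_zero,
    show "  *  |  *  ".toList.map (fun c => String.ofList [c]) =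
      [" ", " ", "*", " ", " ", "|", " ", " ", "*", " ", " "] from by decide]

theorem stepA6 (s : Int) (dr : List (List String)) :
    addingStarStep s (dr, 0) 6 =
      (addingStarAltStep (List.replicate s.toNat " ") dr ("*    |    *", 6), 0) := by
  norm_num [addingStarStep, addingStarAltStep, modify_modify_same, List.append_assoc,
    List.replicate_succ, List.replicate_zero,
    show "*    |    *".toList.map (fun c => String.ofList [c]) =
      ["*", " ", " ", " ", " ", "|", " ", " ", " ", " ", "*"] from by decide]

theorem addingStar_eq_alt (drawing : List (List String)) (maxWidth : Int) :
    addingStar drawing maxWidth = addingStar_alt drawing maxWidth := by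
  show ((List.range 7).foldl (addingStarStep (maxWidth - 6)) (drawing, 4)).1
      = addingStar_alt drawing maxWidth
  rw [show List.range 7 = [0, 1, 2, 3, 4, 5, 6] from by decide]
  rw [List.foldl_cons, stepA0, List.foldl_cons, stepA1, List.foldl_cons, stepA2,
      List.foldl_cons, stepA3, List.foldl_cons, stepA4, List.foldl_cons, stepA5,
      List.foldl_cons, stepA6, List.foldl_nil]
  rw [addingStar_alt,
      show starLines.zipIdx = [("*    *    *", 0), ("  *  *  *  ", 1), ("     *     ", 2),
        ("* * * * * *", 3), ("     *     ", 4), ("  *  |  *  ", 5), ("*    |    *", 6)]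
        from by decide]
  rw [List.foldl_cons, List.foldl_cons, List.foldl_cons, List.foldl_cons,
      List.foldl_cons, List.foldl_cons, List.foldl_cons, List.foldl_nil]

-- ===== VERDICT (by name: the statement is the Claim_ definition above) =====
theorem addingStar_spec : Claim_equal_addingStar := by
  intro drawing maxWidth _
  show addingStar drawing maxWidth = addingStar_alt drawing maxWidth
  exact addingStar_eq_alt drawing maxWidth
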